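-- pv_equiv track=rewrite | github.com/BeingDataScientist/Social_Upgraded | data_gen.py | generate_response_for_score
-- ===== SOURCE A (Python) =====
-- def generate_response_for_score(question, target_score):
--     """Generate a response that gives the target score for a question"""
--     if question == 'Q2':  # Gender
--         options = ['Male', 'Female', 'Other']
--         scores_map = {'Male': 0, 'Female': 1, 'Other': 2}
--         for option, score in scores_map.items():
--             if score == target_score:
--                 return option, score
--     elif question == 'Q3':  # Education
--         options = ['8', '9', '10', 'other']
--         scores_map = {'8': 0, '9': 1, '10': 2, 'other': 3}
--         for option, score in scores_map.items():
--             if score == target_score: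
--                 return option, score
--     elif question == 'Q5':  # Family type
--         options = ['Nuclear', 'Joint', 'Other']
--         scores_map = {'Nuclear': 0, 'Joint': 1, 'Other': 2}
--         for option, score in scores_map.items():
--             if score == target_score:
--                 return option, score
--     elif question == 'Q6':  # SES
--         options = ['Low', 'Middle', 'High']
--         scores_map = {'Low': 0, 'Middle': 1, 'High': 2}
--         for option, score in scores_map.items():
--             if score == target_score:
--                 return option, score
--     else:  # Other questions (Q7-Q22)
--         # For other questions, we need to map score to response
--         # Assuming 0-4 scale for most questions
--         if target_score == 0:
--             return 'Never', 0
--         elif target_score == 1: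
--             return 'Rarely', 1
--         elif target_score == 2:
--             return 'Sometimes', 2
--         elif target_score == 3:
--             return 'Often', 3
--         elif target_score == 4:
--             return 'Always', 4
--
--     # Fallback
--     return 'Sometimes', 2
-- ===== SOURCE B (Python) =====
-- _DEFAULT_TABLE = {0: ('Never', 0), 1: ('Rarely', 1), 2: ('Sometimes', 2),
--                   3: ('Often', 3), 4: ('Always', 4)}
--
-- RESPONSES = {
--     'Q2': {0: ('Male', 0), 1: ('Female', 1), 2: ('Other', 2)},
--     'Q3': {0: ('8', 0), 1: ('9', 1), 2: ('10', 2), 3: ('other', 3)},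
--     'Q5': {0: ('Nuclear', 0), 1: ('Joint', 1), 2: ('Other', 2)},
--     'Q6': {0: ('Low', 0), 1: ('Middle', 1), 2: ('High', 2)},
-- }
--
--
-- def generate_response_for_score(question, target_score):
--     """Generate a response that gives the target score for a question"""
--     table = RESPONSES.get(question, _DEFAULT_TABLE)
--     return table.get(target_score, ('Sometimes', 2))
-- ===== Notes on version B (the rewrite author's own statement) =====
-- stated objective: simpler
-- what changed: Replaces the five-arm if/elif chain with per-option scanning loops by one module-level nested dict keyed by question and score, so the body is two lookups with defaults and no loop or branch.
import Mathlib
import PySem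

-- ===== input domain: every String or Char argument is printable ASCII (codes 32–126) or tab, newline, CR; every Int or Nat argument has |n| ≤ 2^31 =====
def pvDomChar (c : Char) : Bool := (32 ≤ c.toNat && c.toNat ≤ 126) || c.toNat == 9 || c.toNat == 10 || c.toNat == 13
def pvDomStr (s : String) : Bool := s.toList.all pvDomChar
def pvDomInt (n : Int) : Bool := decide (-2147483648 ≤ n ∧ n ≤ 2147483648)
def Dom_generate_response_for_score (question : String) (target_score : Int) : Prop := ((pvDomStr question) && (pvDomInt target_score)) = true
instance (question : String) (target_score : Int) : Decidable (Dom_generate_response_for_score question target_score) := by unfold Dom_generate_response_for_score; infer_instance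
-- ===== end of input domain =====

-- B replaces A's five-arm if/elif chain with scanning loops by one nested lookup table and two keyed lookups (objective: simpler); same return value on all inputs.


-- ===== PORT A =====
-- A-side helper: the 'for option, score in scores_map.items(): if score == target_score: return option, score' loop
def pvScanA : List (String × Int) → Int → Option (String × Int)
  | [], _ => none
  | (o, s) :: rest, t => if s == t then some (o, s) else pvScanA rest t

-- B replaces A's if/elif chain and scanning loops by a nested-dict double lookup (same return values).
def generate_response_for_score (question : String) (target_score : Int) : String × Int :=
  let res : Option (String × Int) :=
    if question == "Q2" then
      pvScanA [("Male", 0), ("Female", 1), ("Other", 2)] target_score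
    else if question == "Q3" then
      pvScanA [("8", 0), ("9", 1), ("10", 2), ("other", 3)] target_score
    else if question == "Q5" then
      pvScanA [("Nuclear", 0), ("Joint", 1), ("Other", 2)] target_score
    else if question == "Q6" then
      pvScanA [("Low", 0), ("Middle", 1), ("High", 2)] target_score
    else if target_score == 0 then some ("Never", 0)
    else if target_score == 1 then some ("Rarely", 1)
    else if target_score == 2 then some ("Sometimes", 2)
    else if target_score == 3 then some ("Often", 3)
    else if target_score == 4 then some ("Always", 4)
    else none
  -- the fall-through 'return 'Sometimes', 2'
  res.getD ("Sometimes", 2)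

-- ===== PORT B =====
def pvDefaultTable : PySem.Dict Int (String × Int) :=
  PySem.Dict.mk [(0, ("Never", 0)), (1, ("Rarely", 1)), (2, ("Sometimes", 2)),
                 (3, ("Often", 3)), (4, ("Always", 4))]

def pvResponses : PySem.Dict String (PySem.Dict Int (String × Int)) :=
  PySem.Dict.mk
    [("Q2", PySem.Dict.mk [(0, ("Male", 0)), (1, ("Female", 1)), (2, ("Other", 2))]),
     ("Q3", PySem.Dict.mk [(0, ("8", 0)), (1, ("9", 1)), (2, ("10", 2)), (3, ("other", 3))]),
     ("Q5", PySem.Dict.mk [(0, ("Nuclear", 0)), (1, ("Joint", 1)), (2, ("Other", 2))]),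
     ("Q6", PySem.Dict.mk [(0, ("Low", 0)), (1, ("Middle", 1)), (2, ("High", 2))])]

def generate_response_for_score_alt (question : String) (target_score : Int) : String × Int :=
  let table := PySem.Dict.getD pvResponses question pvDefaultTable
  PySem.Dict.getD table target_score ("Sometimes", 2)

-- ===== PRECONDITION & SPEC =====
def Spec_generate_response_for_score (question : String) (target_score : Int) (out : String × Int) : Prop := out = generate_response_for_score_alt question target_score
instance (question : String) (target_score : Int) (out : String × Int) : Decidable (Spec_generate_response_for_score question target_score out) := by unfold Spec_generate_response_for_score; infer_instance

-- ===== CLAIM (what is proved, stated in full; the proofs are below) =====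
def Claim_equal_generate_response_for_score : Prop := ∀ (question : String) (target_score : Int), Dom_generate_response_for_score question target_score → Spec_generate_response_for_score question target_score (generate_response_for_score question target_score)

-- ===== LEMMAS AND PROOFS =====
theorem pv_agree (question : String) (target_score : Int) :
    generate_response_for_score question target_score =
      generate_response_for_score_alt question target_score := by
  unfold generate_response_for_score generate_response_for_score_alt pvResponses pvDefaultTable
  by_cases h2 : question = "Q2"
  · subst h2
    rcases eq_or_ne target_score 0 with h | h0; · subst h; decide
    rcases eq_or_ne target_score 1 with h | h1; · subst h; decide
    rcases eq_or_ne target_score 2 with h | h2'; · subst h; decide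
    have b0 : ((0 : Int) == target_score) = false := by simp only [beq_eq_false_iff_ne]; exact Ne.symm h0
    have b1 : ((1 : Int) == target_score) = false := by simp only [beq_eq_false_iff_ne]; exact Ne.symm h1
    have b2 : ((2 : Int) == target_score) = false := by simp only [beq_eq_false_iff_ne]; exact Ne.symm h2'
    simp [pvScanA, List.find?, PySem.Dict.getD, PySem.Dict.get?, b0, b1, b2]
  by_cases h3 : question = "Q3"
  · subst h3
    rcases eq_or_ne target_score 0 with h | h0; · subst h; decide
    rcases eq_or_ne target_score 1 with h | h1; · subst h; decide
    rcases eq_or_ne target_score 2 with h | h2'; · subst h; decide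
    rcases eq_or_ne target_score 3 with h | h3'; · subst h; decide
    have b0 : ((0 : Int) == target_score) = false := by simp only [beq_eq_false_iff_ne]; exact Ne.symm h0
    have b1 : ((1 : Int) == target_score) = false := by simp only [beq_eq_false_iff_ne]; exact Ne.symm h1
    have b2 : ((2 : Int) == target_score) = false := by simp only [beq_eq_false_iff_ne]; exact Ne.symm h2'
    have b3 : ((3 : Int) == target_score) = false := by simp only [beq_eq_false_iff_ne]; exact Ne.symm h3'
    simp [pvScanA, List.find?, PySem.Dict.getD, PySem.Dict.get?, b0, b1, b2, b3]
  by_cases h5 : question = "Q5"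
  · subst h5
    rcases eq_or_ne target_score 0 with h | h0; · subst h; decide
    rcases eq_or_ne target_score 1 with h | h1; · subst h; decide
    rcases eq_or_ne target_score 2 with h | h2'; · subst h; decide
    have b0 : ((0 : Int) == target_score) = false := by simp only [beq_eq_false_iff_ne]; exact Ne.symm h0
    have b1 : ((1 : Int) == target_score) = false := by simp only [beq_eq_false_iff_ne]; exact Ne.symm h1
    have b2 : ((2 : Int) == target_score) = false := by simp only [beq_eq_false_iff_ne]; exact Ne.symm h2'
    simp [pvScanA, List.find?, PySem.Dict.getD, PySem.Dict.get?, b0, b1, b2]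
  by_cases h6 : question = "Q6"
  · subst h6
    rcases eq_or_ne target_score 0 with h | h0; · subst h; decide
    rcases eq_or_ne target_score 1 with h | h1; · subst h; decide
    rcases eq_or_ne target_score 2 with h | h2'; · subst h; decide
    have b0 : ((0 : Int) == target_score) = false := by simp only [beq_eq_false_iff_ne]; exact Ne.symm h0
    have b1 : ((1 : Int) == target_score) = false := by simp only [beq_eq_false_iff_ne]; exact Ne.symm h1
    have b2 : ((2 : Int) == target_score) = false := by simp only [beq_eq_false_iff_ne]; exact Ne.symm h2'
    simp [pvScanA, List.find?, PySem.Dict.getD, PySem.Dict.get?, b0, b1, b2]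
  · have s2 : ("Q2" == question) = false := by simp only [beq_eq_false_iff_ne]; exact Ne.symm h2
    have s3 : ("Q3" == question) = false := by simp only [beq_eq_false_iff_ne]; exact Ne.symm h3
    have s5 : ("Q5" == question) = false := by simp only [beq_eq_false_iff_ne]; exact Ne.symm h5
    have s6 : ("Q6" == question) = false := by simp only [beq_eq_false_iff_ne]; exact Ne.symm h6
    rcases eq_or_ne target_score 0 with h | h0
    · subst h; simp [List.find?, PySem.Dict.getD, PySem.Dict.get?, s2, s3, s5, s6, h2, h3, h5, h6]
    rcases eq_or_ne target_score 1 with h | h1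
    · subst h; simp [List.find?, PySem.Dict.getD, PySem.Dict.get?, s2, s3, s5, s6, h2, h3, h5, h6]
    rcases eq_or_ne target_score 2 with h | h2'
    · subst h; simp [List.find?, PySem.Dict.getD, PySem.Dict.get?, s2, s3, s5, s6, h2, h3, h5, h6]
    rcases eq_or_ne target_score 3 with h | h3'
    · subst h; simp [List.find?, PySem.Dict.getD, PySem.Dict.get?, s2, s3, s5, s6, h2, h3, h5, h6]
    rcases eq_or_ne target_score 4 with h | h4'
    · subst h; simp [List.find?, PySem.Dict.getD, PySem.Dict.get?, s2, s3, s5, s6, h2, h3, h5, h6]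
    have b0 : ((0 : Int) == target_score) = false := by simp only [beq_eq_false_iff_ne]; exact Ne.symm h0
    have b1 : ((1 : Int) == target_score) = false := by simp only [beq_eq_false_iff_ne]; exact Ne.symm h1
    have b2 : ((2 : Int) == target_score) = false := by simp only [beq_eq_false_iff_ne]; exact Ne.symm h2'
    have b3 : ((3 : Int) == target_score) = false := by simp only [beq_eq_false_iff_ne]; exact Ne.symm h3'
    have b4 : ((4 : Int) == target_score) = false := by simp only [beq_eq_false_iff_ne]; exact Ne.symm h4'
    simp [List.find?, PySem.Dict.getD, PySem.Dict.get?, s2, s3, s5, s6, h2, h3, h5, h6, b0, b1, b2, b3, b4, h0, h1, h2', h3', h4']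

-- ===== VERDICT (by name: the statement is the Claim_ definition above) =====
theorem generate_response_for_score_spec : Claim_equal_generate_response_for_score := by
  intro question target_score _
  exact pv_agree question target_score
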